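-- pv_equiv track=rewrite | github.com/einioville/JukkaBot | src/jukkabot/bot.py | _replace_prompt_section
-- ===== SOURCE A (Python) =====
-- from typing import Iterable
--
-- EMPTY_DYNAMIC_MEMORY_LINE = "- Ei tallennettuja faktoja."
--
-- def _replace_prompt_section(
--
--     prompt_text: str,
--     section_header: str,
--     replacement_lines: Iterable[str],
-- ) -> str:
--     lines = prompt_text.splitlines()
--     replacement = list(replacement_lines)
--     if not replacement:
--         replacement = [EMPTY_DYNAMIC_MEMORY_LINE]
--
--     header_index: int | None = None
--     header_key = section_header.casefold()
--     for index, line in enumerate(lines):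
--         if line.strip().casefold() == header_key:
--             header_index = index
--             break
--
--     if header_index is None:
--         if lines and lines[-1].strip():
--             lines.append("")
--         lines.append(section_header)
--         lines.extend(replacement)
--         return "\n".join(lines).rstrip() + "\n"
--
--     section_start = header_index + 1
--     section_end = len(lines)
--     for index in range(section_start, len(lines)):
--         stripped = lines[index].strip()
--         if stripped.startswith("[") and stripped.endswith("]"):
--             section_end = index
--             break
--
--     updated = lines[:section_start] + replacement + lines[section_end:]
--     return "\n".join(updated).rstrip() + "\n"
-- ===== SOURCE B (Python) =====
-- EMPTY_DYNAMIC_MEMORY_LINE = "- Ei tallennettuja faktoja."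
--
-- def _replace_prompt_section(prompt_text, section_header, replacement_lines):
--     replacement = list(replacement_lines) or [EMPTY_DYNAMIC_MEMORY_LINE]
--     key = section_header.casefold()
--     out = []
--     skipping = False
--     found = False
--     for line in prompt_text.splitlines():
--         if skipping:
--             s = line.strip()
--             if s.startswith("[") and s.endswith("]"):
--                 skipping = False
--                 out.append(line)
--         elif not found and line.strip().casefold() == key:
--             found = True
--             out.append(line)
--             out.extend(replacement)
--             skipping = True
--         else:
--             out.append(line)
--     if not found:
--         if out and out[-1].strip():
--             out.append("")
--         out.append(section_header)
--         out.extend(replacement)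
--     return "\n".join(out).rstrip() + "\n"
-- ===== Notes on version B (the rewrite author's own statement) =====
-- stated objective: alternative
-- what changed: A's two separate index scans (find the header index, then scan forward for the next bracketed section line) and list splice are replaced by one stateful single pass over the lines with copy/skip modes and a header-found flag, accumulating the output directly.
import Mathlib
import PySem

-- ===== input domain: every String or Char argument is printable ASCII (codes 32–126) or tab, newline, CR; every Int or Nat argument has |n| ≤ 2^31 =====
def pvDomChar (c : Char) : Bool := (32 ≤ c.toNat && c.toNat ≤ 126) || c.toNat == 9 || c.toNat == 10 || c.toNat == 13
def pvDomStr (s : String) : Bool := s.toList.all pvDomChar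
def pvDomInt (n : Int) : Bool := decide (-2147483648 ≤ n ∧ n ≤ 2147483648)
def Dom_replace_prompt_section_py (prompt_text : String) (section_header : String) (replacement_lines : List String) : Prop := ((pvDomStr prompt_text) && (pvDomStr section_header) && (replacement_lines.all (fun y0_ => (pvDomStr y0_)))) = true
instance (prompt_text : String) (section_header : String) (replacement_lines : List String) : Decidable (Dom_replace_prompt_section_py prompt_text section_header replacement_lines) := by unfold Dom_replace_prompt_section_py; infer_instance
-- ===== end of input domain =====

-- B replaces A's two separate index scans (find header, then find next "[...]" line) by a single
-- stateful pass over the lines (copy / skip modes); objective: alternative decomposition, same cost.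
-- (casefold is ported as PySem.Str.lower: exact on the ASCII domain Dom_ admits.)

-- ===== PORT A =====
def pvKeyMatch (key : String) (l : String) : Bool := PySem.Str.lower (PySem.Str.strip l) == key
def pvIsBracket (l : String) : Bool :=
  PySem.Str.startswith (PySem.Str.strip l) "[" && PySem.Str.endswith (PySem.Str.strip l) "]"

def replace_prompt_section_py (prompt_text : String) (section_header : String) (replacement_lines : List String) : String :=
  let lines := PySem.Str.splitlines prompt_text
  let replacement := if replacement_lines = [] then ["- Ei tallennettuja faktoja."] else replacement_lines
  let header_key := PySem.Str.lower section_header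
  match lines.findIdx? (pvKeyMatch header_key) with
  | none =>
      let lines2 := if lines ≠ [] ∧ PySem.Str.strip (lines.getLastD "") ≠ "" then lines ++ [""] else lines
      PySem.Str.rstrip (PySem.Str.join "\n" (lines2 ++ [section_header] ++ replacement)) ++ "\n"
  | some header_index =>
      let section_start := header_index + 1
      let section_end := section_start + (lines.drop section_start).findIdx pvIsBracket
      let updated := lines.take section_start ++ replacement ++ lines.drop section_end
      PySem.Str.rstrip (PySem.Str.join "\n" updated) ++ "\n"

-- ===== PORT B =====
def pvBLoop (key : String) (repl : List String) : List String → Bool → Bool → List String × Bool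
  | [], _, found => ([], found)
  | l :: ls, skipping, found =>
    if skipping then
      if pvIsBracket l then
        let r := pvBLoop key repl ls false found
        (l :: r.1, r.2)
      else pvBLoop key repl ls true found
    else if !found && pvKeyMatch key l then
      let r := pvBLoop key repl ls true true
      (l :: (repl ++ r.1), r.2)
    else
      let r := pvBLoop key repl ls skipping found
      (l :: r.1, r.2)

def replace_prompt_section_py_alt (prompt_text : String) (section_header : String) (replacement_lines : List String) : String :=
  let repl := if replacement_lines = [] then ["- Ei tallennettuja faktoja."] else replacement_lines
  let key := PySem.Str.lower section_header
  let res := pvBLoop key repl (PySem.Str.splitlines prompt_text) false false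
  let out :=
    if res.2 then res.1
    else (if res.1 ≠ [] ∧ PySem.Str.strip (res.1.getLastD "") ≠ "" then res.1 ++ [""] else res.1)
           ++ [section_header] ++ repl
  PySem.Str.rstrip (PySem.Str.join "\n" out) ++ "\n"

-- ===== PRECONDITION & SPEC =====
def Spec_replace_prompt_section_py (prompt_text : String) (section_header : String) (replacement_lines : List String) (out : String) : Prop := out = replace_prompt_section_py_alt prompt_text section_header replacement_lines
instance (prompt_text : String) (section_header : String) (replacement_lines : List String) (out : String) : Decidable (Spec_replace_prompt_section_py prompt_text section_header replacement_lines out) := by unfold Spec_replace_prompt_section_py; infer_instance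

-- ===== CLAIM (what is proved, stated in full; the proofs are below) =====
def Claim_equal_replace_prompt_section_py : Prop := ∀ (prompt_text : String) (section_header : String) (replacement_lines : List String), Dom_replace_prompt_section_py prompt_text section_header replacement_lines → Spec_replace_prompt_section_py prompt_text section_header replacement_lines (replace_prompt_section_py prompt_text section_header replacement_lines)

-- ===== LEMMAS AND PROOFS =====

-- after the skipped section ends B copies every remaining line verbatim
theorem pvBLoop_copy (key : String) (repl : List String) (ls : List String) :
    pvBLoop key repl ls false true = (ls, true) := by
  induction ls with
  | nil => rfl
  | cons l ls ih => simp [pvBLoop, ih]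

-- in skip mode B drops lines up to (excluding) the first bracket line
theorem pvBLoop_skip (key : String) (repl : List String) (ls : List String) :
    pvBLoop key repl ls true true = (ls.drop (ls.findIdx pvIsBracket), true) := by
  induction ls with
  | nil => rfl
  | cons l ls ih =>
    by_cases h : pvIsBracket l = true
    · simp [pvBLoop, h, List.findIdx_cons, pvBLoop_copy]
    · simp [pvBLoop, h, List.findIdx_cons, ih]

-- B's single pass computes exactly A's splice (or the unchanged lines if no header matches)
theorem pvBLoop_main (key : String) (repl : List String) (ls : List String) :
    pvBLoop key repl ls false false =
      match ls.findIdx? (pvKeyMatch key) with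
      | none => (ls, false)
      | some hi => (ls.take (hi+1) ++ repl ++
          (ls.drop (hi+1)).drop ((ls.drop (hi+1)).findIdx pvIsBracket), true) := by
  induction ls with
  | nil => rfl
  | cons l ls ih =>
    by_cases h : pvKeyMatch key l = true
    · simp [pvBLoop, h, List.findIdx?_cons, pvBLoop_skip]
    · simp only [pvBLoop, h, List.findIdx?_cons, Bool.not_false, Bool.true_and, if_neg,
        Bool.false_eq_true, not_false_eq_true, ih]
      cases hf : ls.findIdx? (pvKeyMatch key) with
      | none => simp_all
      | some hi => simp_all [List.take_succ_cons, List.drop_succ_cons]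

-- ===== VERDICT (by name: the statement is the Claim_ definition above) =====
theorem replace_prompt_section_py_spec : Claim_equal_replace_prompt_section_py := by
  intro pt sh rl _
  unfold Spec_replace_prompt_section_py replace_prompt_section_py replace_prompt_section_py_alt
  simp only [pvBLoop_main]
  cases hf : (PySem.Str.splitlines pt).findIdx? (pvKeyMatch (PySem.Str.lower sh)) with
  | none => simp
  | some hi => simp [List.drop_drop]
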